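-- pv_equiv track=rewrite | github.com/valentarayre/proyecto-01-TUP-Prog | mian.py | cambiar_numero
-- ===== SOURCE A (Python) =====
-- def cambiar_numero(num):
-- 	#Devuelve el numero cuando se haya cambiado al completo
-- 	if num == 0:
-- 		return num
-- 	else:
-- 		#si el numero es par se agrega 1 o sino 2
-- 		#Modulo de 10 devuelve el ultimo numero y ese numero comprobamos si es par o no
-- 		if (num % 10) % 2 == 0:
-- 			return cambiar_numero(num // 10) * 10 + 1
-- 		else:
-- 			return cambiar_numero(num // 10) * 10 + 2
-- ===== SOURCE B (Python) =====
-- def cambiar_numero(num):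
--     result = 0
--     place = 1
--     while num != 0:
--         result += (1 if (num % 10) % 2 == 0 else 2) * place
--         place *= 10
--         num //= 10
--     return result
-- ===== Notes on version B (the rewrite author's own statement) =====
-- stated objective: alternative
-- what changed: Replaces the most-significant-first recursion (result*10 + digit) by an iterative least-significant-first loop that accumulates (1 or 2)*place with a running power of ten.
import Mathlib
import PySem

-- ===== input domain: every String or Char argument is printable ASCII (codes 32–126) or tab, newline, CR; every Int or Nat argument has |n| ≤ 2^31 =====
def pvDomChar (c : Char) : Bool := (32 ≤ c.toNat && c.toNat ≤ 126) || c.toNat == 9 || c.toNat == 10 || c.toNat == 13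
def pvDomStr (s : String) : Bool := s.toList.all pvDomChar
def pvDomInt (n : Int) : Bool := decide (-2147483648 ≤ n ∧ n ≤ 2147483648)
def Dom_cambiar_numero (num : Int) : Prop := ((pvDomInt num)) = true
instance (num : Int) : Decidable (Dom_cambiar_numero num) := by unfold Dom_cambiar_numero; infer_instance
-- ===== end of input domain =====

-- B replaces A's most-significant-first recursion by an iterative least-significant-first
-- place-value loop (alternative decomposition, same cost).


-- ===== PORT A =====
-- A's recursion made total with fuel (num.toNat + 1 suffices for num ≥ 0; for num < 0 the
-- Python recursion never terminates, excluded by Pre_).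
def cambiarA : Nat → Int → Int
  | 0, _ => 0
  | f + 1, num =>
    if num = 0 then num
    else if PySem.Int.mod (PySem.Int.mod num 10) 2 = 0 then
      cambiarA f (PySem.Int.floordiv num 10) * 10 + 1
    else
      cambiarA f (PySem.Int.floordiv num 10) * 10 + 2

def cambiar_numero (num : Int) : Int := cambiarA (num.toNat + 1) num

-- ===== PORT B =====
-- B's while-loop as fuelled tail recursion over the state (num, result, place).
def cambiarB : Nat → Int → Int → Int → Int
  | 0, _, result, _ => result
  | f + 1, num, result, place =>
    if num = 0 then result
    else
      cambiarB f (PySem.Int.floordiv num 10)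
        (result + (if PySem.Int.mod (PySem.Int.mod num 10) 2 = 0 then 1 else 2) * place)
        (place * 10)

def cambiar_numero_alt (num : Int) : Int := cambiarB (num.toNat + 1) num 0 1

-- ===== PRECONDITION & SPEC =====
-- Pre_ excludes negative num, on which Python A raises RecursionError (num // 10 sticks at -1).
def Pre_cambiar_numero (num : Int) : Prop := 0 ≤ num
instance (num : Int) : Decidable (Pre_cambiar_numero num) := by unfold Pre_cambiar_numero; infer_instance
def pvWitness_cambiar_numero : Int := (7)

def Spec_cambiar_numero (num : Int) (out : Int) : Prop := out = cambiar_numero_alt num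
instance (num : Int) (out : Int) : Decidable (Spec_cambiar_numero num out) := by unfold Spec_cambiar_numero; infer_instance

-- ===== CLAIM (what is proved, stated in full; the proofs are below) =====
def Claim_equal_cambiar_numero : Prop := ∀ (num : Int), Dom_cambiar_numero num → Pre_cambiar_numero num → Spec_cambiar_numero num (cambiar_numero num)

-- ===== LEMMAS AND PROOFS =====
lemma cambiar_main : ∀ (k n : Nat), n < k → ∀ (r p : Int),
    cambiarB k (n : Int) r p = r + cambiarA k (n : Int) * p := by
  intro k
  induction k with
  | zero => intro n h; omega
  | succ f ih =>
    intro n h r p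
    by_cases h0 : (n : Int) = 0
    · simp [cambiarB, cambiarA, h0]
    · have hn : 0 < n := by
        rcases Nat.eq_zero_or_pos n with h' | h'
        · exact absurd (by exact_mod_cast congrArg (Nat.cast : Nat → Int) h') h0
        · exact h'
      have hdiv : n / 10 < f := by
        have := Nat.div_lt_self hn (by norm_num : 1 < 10)
        omega
      simp only [cambiarB, cambiarA, if_neg h0]
      rw [show PySem.Int.floordiv (n : Int) 10 = ((n / 10 : Nat) : Int) from by
        exact_mod_cast PySem.Int.floordiv_natCast n 10]
      rw [ih _ hdiv]
      split_ifs <;> ring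

-- ===== VERDICT (by name: the statement is the Claim_ definition above) =====
theorem cambiar_numero_spec : Claim_equal_cambiar_numero := by
  intro num _ hpre
  unfold Spec_cambiar_numero cambiar_numero cambiar_numero_alt
  have hcast : ((num.toNat : Nat) : Int) = num := Int.toNat_of_nonneg hpre
  rw [← hcast]
  simp only [Int.toNat_natCast]
  rw [cambiar_main (num.toNat + 1) num.toNat (Nat.lt_succ_self _) 0 1]
  simp
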